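-- pv_equiv track=rewrite | github.com/venkat15vk/vektor | backend/adapters/aws_iam.py | _is_privileged
-- ===== SOURCE A (Python) =====
-- HIGH_RISK_ACTIONS: set[str] = {
--     "iam:CreateRole",
--     "iam:AttachRolePolicy",
--     "iam:PutRolePolicy",
--     "iam:CreateUser",
--     "iam:AttachUserPolicy",
--     "iam:PutUserPolicy",
--     "iam:PassRole",
--     "iam:CreateAccessKey",
--     "iam:UpdateAssumeRolePolicy",
--     "sts:AssumeRole",
--     "iam:AddUserToGroup",
--     "iam:CreatePolicy",
--     "iam:CreatePolicyVersion",
--     "lambda:CreateFunction",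
--     "lambda:UpdateFunctionCode",
--     "lambda:InvokeFunction",
--     "lambda:AddPermission",
--     "s3:PutBucketPolicy",
--     "s3:DeleteBucket",
--     "ec2:RunInstances",
--     "ec2:ModifyInstanceAttribute",
--     "secretsmanager:GetSecretValue",
--     "kms:Decrypt",
--     "organizations:*",
--     "iam:*",
--     "sts:*",
-- }
--
-- def _is_privileged(actions: list[str]) -> bool:
--     """Return True if any action matches a high-risk pattern."""
--     action_set = set(actions)
--     for hra in HIGH_RISK_ACTIONS:
--         if hra in action_set:
--             return True
--         # Handle wildcard matches like "iam:*"
--         if hra.endswith("*"):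
--             prefix = hra[:-1]
--             if any(a.startswith(prefix) for a in action_set):
--                 return True
--     # Also check if the subject's actions contain wildcards that cover high-risk
--     if "*" in action_set or any(a.endswith(":*") for a in action_set):
--         return True
--     return False
-- ===== SOURCE B (Python) =====
-- HIGH_RISK_ACTIONS: set[str] = {
--     "iam:CreateRole",
--     "iam:AttachRolePolicy",
--     "iam:PutRolePolicy",
--     "iam:CreateUser",
--     "iam:AttachUserPolicy",
--     "iam:PutUserPolicy",
--     "iam:PassRole",
--     "iam:CreateAccessKey",
--     "iam:UpdateAssumeRolePolicy",
--     "sts:AssumeRole",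
--     "iam:AddUserToGroup",
--     "iam:CreatePolicy",
--     "iam:CreatePolicyVersion",
--     "lambda:CreateFunction",
--     "lambda:UpdateFunctionCode",
--     "lambda:InvokeFunction",
--     "lambda:AddPermission",
--     "s3:PutBucketPolicy",
--     "s3:DeleteBucket",
--     "ec2:RunInstances",
--     "ec2:ModifyInstanceAttribute",
--     "secretsmanager:GetSecretValue",
--     "kms:Decrypt",
--     "organizations:*",
--     "iam:*",
--     "sts:*",
-- }
--
-- # Wildcard prefixes, computed once from the pattern set.
-- _WILDCARD_PREFIXES = tuple(h[:-1] for h in HIGH_RISK_ACTIONS if h.endswith("*"))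
--
--
-- def _is_privileged(actions: list[str]) -> bool:
--     """Return True if any action matches a high-risk pattern (single pass over actions)."""
--     for a in actions:
--         if (a in HIGH_RISK_ACTIONS or a == "*" or a.endswith(":*")
--                 or a.startswith(_WILDCARD_PREFIXES)):
--             return True
--     return False
-- ===== Notes on version B (the rewrite author's own statement) =====
-- stated objective: simpler
-- what changed: Inverts the iteration: instead of looping over the pattern set with a nested scan of the action set per wildcard pattern, B precomputes the wildcard prefixes once and makes a single pass over the input actions, testing each action against membership, the bare-'*' / ':*' wildcard rules and the prefix tuple.
import Mathlib
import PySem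

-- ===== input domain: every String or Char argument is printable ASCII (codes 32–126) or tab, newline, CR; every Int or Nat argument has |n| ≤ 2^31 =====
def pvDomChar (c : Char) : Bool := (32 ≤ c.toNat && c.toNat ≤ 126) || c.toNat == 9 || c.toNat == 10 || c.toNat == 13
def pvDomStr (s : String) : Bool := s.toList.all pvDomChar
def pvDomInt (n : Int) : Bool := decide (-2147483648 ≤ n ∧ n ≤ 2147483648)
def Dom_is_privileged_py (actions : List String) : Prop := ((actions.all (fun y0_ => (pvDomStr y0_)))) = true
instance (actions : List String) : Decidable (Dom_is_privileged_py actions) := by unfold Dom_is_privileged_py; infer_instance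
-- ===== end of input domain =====

-- B re-implements the check as a single pass over the input actions against a precomputed
-- wildcard-prefix list, instead of A's loop over the pattern set with a nested scan per wildcard.

-- the module-level constant HIGH_RISK_ACTIONS (a set literal; used by both programs)
def pvHighRisk : List String :=
  [ "iam:CreateRole", "iam:AttachRolePolicy", "iam:PutRolePolicy", "iam:CreateUser",
    "iam:AttachUserPolicy", "iam:PutUserPolicy", "iam:PassRole", "iam:CreateAccessKey",
    "iam:UpdateAssumeRolePolicy", "sts:AssumeRole", "iam:AddUserToGroup", "iam:CreatePolicy",
    "iam:CreatePolicyVersion", "lambda:CreateFunction", "lambda:UpdateFunctionCode",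
    "lambda:InvokeFunction", "lambda:AddPermission", "s3:PutBucketPolicy", "s3:DeleteBucket",
    "ec2:RunInstances", "ec2:ModifyInstanceAttribute", "secretsmanager:GetSecretValue",
    "kms:Decrypt", "organizations:*", "iam:*", "sts:*" ]

-- ===== PORT A =====
-- A iterates over the HIGH_RISK_ACTIONS set; the result is a Bool short-circuit 'any',
-- so it does not depend on the (unmodelled) hash iteration order.
def is_privileged_py (actions : List String) : Bool :=
  let actionSet := PySem.Set.ofList actions
  if pvHighRisk.any (fun hra =>
      PySem.Set.contains actionSet hra ||
      (PySem.Str.endswith hra "*" &&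
        actionSet.any (fun a => PySem.Str.startswith a (PySem.Str.slice hra none (some (-1))))))
  then true
  else if PySem.Set.contains actionSet "*" ||
          actionSet.any (fun a => PySem.Str.endswith a ":*")
  then true
  else false

-- ===== PORT B =====
-- _WILDCARD_PREFIXES = tuple(h[:-1] for h in HIGH_RISK_ACTIONS if h.endswith("*"))
def pvWildcardPrefixes : List String :=
  (pvHighRisk.filter (fun h => PySem.Str.endswith h "*")).map
    (fun h => PySem.Str.slice h none (some (-1)))

def is_privileged_py_alt (actions : List String) : Bool :=
  actions.any (fun a =>
    pvHighRisk.contains a || a == "*" || PySem.Str.endswith a ":*" ||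
    pvWildcardPrefixes.any (fun p => PySem.Str.startswith a p))

-- ===== PRECONDITION & SPEC =====
def Spec_is_privileged_py (actions : List String) (out : Bool) : Prop := out = is_privileged_py_alt actions
instance (actions : List String) (out : Bool) : Decidable (Spec_is_privileged_py actions out) := by unfold Spec_is_privileged_py; infer_instance

-- ===== CLAIM (what is proved, stated in full; the proofs are below) =====
def Claim_equal_is_privileged_py : Prop := ∀ (actions : List String), Dom_is_privileged_py actions → Spec_is_privileged_py actions (is_privileged_py actions)

-- ===== LEMMAS AND PROOFS =====

theorem pv_main (actions : List String) :
    is_privileged_py actions = is_privileged_py_alt actions := by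
  rw [Bool.eq_iff_iff, is_privileged_py, is_privileged_py_alt]
  simp only [List.any_eq_true, Bool.or_eq_true, Bool.and_eq_true, beq_iff_eq,
    PySem.Set.contains_iff, PySem.Set.mem_ofList, List.contains_eq_mem,
    List.mem_filter, List.mem_map, decide_eq_true_eq, pvWildcardPrefixes,
    Bool.if_true_left, Bool.if_false_right]
  constructor
  · rintro (⟨h, hH, hin | ⟨hew, a, ha, hsw⟩⟩ | ⟨hstar | ⟨a, ha, he⟩, -⟩)
    · exact ⟨h, hin, Or.inl (Or.inl (Or.inl hH))⟩
    · exact ⟨a, ha, Or.inr ⟨_, ⟨h, ⟨hH, hew⟩, rfl⟩, hsw⟩⟩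
    · exact ⟨"*", hstar, Or.inl (Or.inl (Or.inr rfl))⟩
    · exact ⟨a, ha, Or.inl (Or.inr he)⟩
  · rintro ⟨a, ha, ((hH | rfl) | he) | ⟨p, ⟨h, ⟨hH, hew⟩, rfl⟩, hsw⟩⟩
    · exact Or.inl ⟨a, hH, Or.inl ha⟩
    · exact Or.inr ⟨Or.inl ha, trivial⟩
    · exact Or.inr ⟨Or.inr ⟨a, ha, he⟩, trivial⟩
    · exact Or.inl ⟨h, hH, Or.inr ⟨hew, a, ha, hsw⟩⟩

-- ===== VERDICT (by name: the statement is the Claim_ definition above) =====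
theorem is_privileged_py_spec : Claim_equal_is_privileged_py := by
  intro actions _
  unfold Spec_is_privileged_py
  exact pv_main actions
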